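-- pv_equiv track=rewrite | github.com/Davin1621/motors-software | graphics_tab.py | arrays_options_filters
-- ===== SOURCE A (Python) =====
-- def logic_filter_and( output_array, condition_1, array_2, condition_2):
--
--     for i in range(len(output_array)):
--         if output_array[i]==condition_1 and array_2[i]==condition_2:
--             output_array[i]=True #filter_output[i] is already true because of the condition
--         else:
--             output_array[i]=False
--
-- def create_array( length):
--
--         array_to_filter=[]
--         for i in range(length):
--
--             array_to_filter.append(False)
--
--         return array_to_filter
--
-- def arrays_options_filters(array_to_filter, array_checkboxes_selected, value1, value2, value_checkboxes_selected):
--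
--     filter_output=create_array(len(array_to_filter))
--
--     filtered_values_dropdowns=[]
--
--     filtered_values_dropdowns.append(value1)
--     filtered_values_dropdowns.append(value2)
--
--     Aux_arrays=[]
--
--     Aux_arrays_id_excluded=[]
--     Aux_arrays_id_selected=[]
--
--     #---------------------------------------------------------creation of aux arrays-----------------------------------------------------
--
--     for ivalues in range(len(filtered_values_dropdowns)):
--
--         Aux_arrays.append(create_array(len(array_to_filter)))  #creates arrays the size of the items arrays for each filter
--
--         if filtered_values_dropdowns[ivalues]=="(no selection)":    #adds a term to the array if it is equal to "(no selection)"
--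
--             Aux_arrays_id_excluded.append(ivalues)
--         else:
--
--             Aux_arrays_id_selected.append(ivalues)
--
--     #---------------------------------------------------------load values to aux arrays-----------------------------------------------------
--
--     if len(Aux_arrays_id_excluded)==len(Aux_arrays):    #if none is selected, show all
--
--         for i in range(len(array_to_filter)):   #loop of items to set all to TRUE
--
--             filter_output[i]=True
--     else:
--         for i in range(len(array_to_filter)):   #LOOP OF ITEMS
--
--             for ivalues in range(len(filtered_values_dropdowns)):   #LOOP OF FILTERS
--
--                 if ivalues not in Aux_arrays_id_excluded:   #if it is not one the excluded
--
--                     if array_to_filter[i][ivalues]==filtered_values_dropdowns[ivalues]:   #if the values are equal to the filter TRUE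
--
--                         Aux_arrays[ivalues][i]=True
--
--                     else:   #if it is not equal then FALSE
--
--                         Aux_arrays[ivalues][i]=False
--
--     #---------------------------------------------------------filters output-----------------------------------------------------
--
--     if len(Aux_arrays_id_selected)==1:      #if there is only one filter selected
--
--         filter_output=Aux_arrays[Aux_arrays_id_selected[0]]
--
--     if len(Aux_arrays_id_selected)>1:       #if there are at least 2 filters selected
--
--         for i_array in range(len(Aux_arrays)):  #loop for each filter
--
--             if i_array==0:
--
--                 filter_output=Aux_arrays[Aux_arrays_id_selected[0]] #only for the first cicly does not matter filter_output state
--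
--             else:
--                 logic_filter_and(filter_output, True, Aux_arrays[i_array], True)
--
--     #---------------------------------------------------------selected boxes logic last filter-----------------------------------------------------
--
--     if value_checkboxes_selected!="(no selection)":
--         match value_checkboxes_selected:
--             case "Selected":
--                 logic_filter_and(filter_output, True, array_checkboxes_selected, True)
--
--             case "Not Selected":
--
--                 logic_filter_and(filter_output, True, array_checkboxes_selected, False)
--
--     return filter_output
-- ===== SOURCE B (Python) =====
-- def arrays_options_filters(array_to_filter, array_checkboxes_selected, value1, value2, value_checkboxes_selected):
--     dropdowns = [value1, value2]
--     selected = [d for d in range(2) if dropdowns[d] != "(no selection)"]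
--     out = []
--     for i in range(len(array_to_filter)):
--         ok = all(array_to_filter[i][d] == dropdowns[d] for d in selected)
--         if value_checkboxes_selected == "Selected":
--             ok = ok and array_checkboxes_selected[i] == True
--         elif value_checkboxes_selected == "Not Selected":
--             ok = ok and array_checkboxes_selected[i] == False
--         out.append(ok)
--     return out
-- ===== Notes on version B (the rewrite author's own statement) =====
-- stated objective: simpler
-- what changed: B computes each output flag directly in one pass as a conjunction over the selected dropdown filters plus the checkbox condition, instead of A's building per-filter auxiliary boolean arrays, an excluded/selected id bookkeeping pass, and separate element-wise AND passes (logic_filter_and).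
import Mathlib
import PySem

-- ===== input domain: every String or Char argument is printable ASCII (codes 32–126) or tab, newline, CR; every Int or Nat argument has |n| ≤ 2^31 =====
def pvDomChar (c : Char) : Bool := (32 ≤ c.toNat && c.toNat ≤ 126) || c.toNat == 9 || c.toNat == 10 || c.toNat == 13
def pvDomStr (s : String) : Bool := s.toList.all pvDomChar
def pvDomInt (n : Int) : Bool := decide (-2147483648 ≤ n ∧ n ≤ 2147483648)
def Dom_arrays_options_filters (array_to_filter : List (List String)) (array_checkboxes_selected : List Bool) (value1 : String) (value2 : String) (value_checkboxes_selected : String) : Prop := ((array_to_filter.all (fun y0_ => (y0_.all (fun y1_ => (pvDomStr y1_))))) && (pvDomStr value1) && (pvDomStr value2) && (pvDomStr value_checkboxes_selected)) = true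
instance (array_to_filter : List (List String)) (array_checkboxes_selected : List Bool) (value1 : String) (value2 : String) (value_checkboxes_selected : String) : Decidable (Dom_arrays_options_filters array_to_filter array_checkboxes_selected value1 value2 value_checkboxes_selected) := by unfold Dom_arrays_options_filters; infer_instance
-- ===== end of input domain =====

-- ===== PORT A =====
-- B replaces A's aux-array build plus separate AND passes by a single direct conjunction pass (objective: simpler).
def logic_filter_and (output_array : List Bool) (condition_1 : Bool) (array_2 : List Bool) (condition_2 : Bool) : List Bool :=
  (PySem.List.pyRange 0 (PySem.List.len output_array) 1).foldl
    (fun out i =>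
      if PySem.List.pyGetD out i false == condition_1 && PySem.List.pyGetD array_2 i false == condition_2 then
        PySem.List.pySetD out i true
      else
        PySem.List.pySetD out i false)
    output_array

def create_array (length : Int) : List Bool :=
  (PySem.List.pyRange 0 length 1).foldl (fun array_to_filter _ => array_to_filter ++ [false]) []

def arrays_options_filters (array_to_filter : List (List String)) (array_checkboxes_selected : List Bool) (value1 : String) (value2 : String) (value_checkboxes_selected : String) : List Bool :=
  let filter_output := create_array (PySem.List.len array_to_filter)
  let filtered_values_dropdowns : List String := [] ++ [value1] ++ [value2]
  let st :=
    (PySem.List.pyRange 0 (PySem.List.len filtered_values_dropdowns) 1).foldl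
      (fun (s : List (List Bool) × List Int × List Int) ivalues =>
        let aux := s.1 ++ [create_array (PySem.List.len array_to_filter)]
        if PySem.List.pyGetD filtered_values_dropdowns ivalues "" == "(no selection)" then
          (aux, s.2.1 ++ [ivalues], s.2.2)
        else
          (aux, s.2.1, s.2.2 ++ [ivalues]))
      ([], [], [])
  let excluded := st.2.1
  let selected := st.2.2
  let fa :=
    if PySem.List.len excluded == PySem.List.len st.1 then
      ((PySem.List.pyRange 0 (PySem.List.len array_to_filter) 1).foldl
          (fun fo i => PySem.List.pySetD fo i true) filter_output,
       st.1)
    else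
      (filter_output,
       (PySem.List.pyRange 0 (PySem.List.len array_to_filter) 1).foldl
         (fun aux i =>
           (PySem.List.pyRange 0 (PySem.List.len filtered_values_dropdowns) 1).foldl
             (fun aux ivalues =>
               if !(excluded.contains ivalues) then
                 if PySem.List.pyGetD (PySem.List.pyGetD array_to_filter i []) ivalues "" ==
                     PySem.List.pyGetD filtered_values_dropdowns ivalues "" then
                   PySem.List.pySetD aux ivalues (PySem.List.pySetD (PySem.List.pyGetD aux ivalues []) i true)
                 else
                   PySem.List.pySetD aux ivalues (PySem.List.pySetD (PySem.List.pyGetD aux ivalues []) i false)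
               else aux)
             aux)
         st.1)
  let filter_output1 := fa.1
  let aux_arrays := fa.2
  let filter_output2 :=
    if PySem.List.len selected == 1 then
      PySem.List.pyGetD aux_arrays (PySem.List.pyGetD selected 0 0) []
    else filter_output1
  let filter_output3 :=
    if PySem.List.len selected > 1 then
      (PySem.List.pyRange 0 (PySem.List.len aux_arrays) 1).foldl
        (fun fo i_array =>
          if i_array == 0 then
            PySem.List.pyGetD aux_arrays (PySem.List.pyGetD selected 0 0) []
          else
            logic_filter_and fo true (PySem.List.pyGetD aux_arrays i_array []) true)
        filter_output2
    else filter_output2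
  if value_checkboxes_selected ≠ "(no selection)" then
    if value_checkboxes_selected == "Selected" then
      logic_filter_and filter_output3 true array_checkboxes_selected true
    else if value_checkboxes_selected == "Not Selected" then
      logic_filter_and filter_output3 true array_checkboxes_selected false
    else filter_output3
  else filter_output3

-- ===== PORT B =====
def arrays_options_filters_alt (array_to_filter : List (List String)) (array_checkboxes_selected : List Bool) (value1 : String) (value2 : String) (value_checkboxes_selected : String) : List Bool :=
  let dropdowns : List String := [value1, value2]
  let selected : List Int :=
    (PySem.List.pyRange 0 2 1).filter
      (fun d => PySem.List.pyGetD dropdowns d "" != "(no selection)")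
  (PySem.List.pyRange 0 (PySem.List.len array_to_filter) 1).foldl
    (fun out i =>
      let ok := selected.all
        (fun d => PySem.List.pyGetD (PySem.List.pyGetD array_to_filter i []) d "" == PySem.List.pyGetD dropdowns d "")
      let ok :=
        if value_checkboxes_selected == "Selected" then
          ok && (PySem.List.pyGetD array_checkboxes_selected i false == true)
        else if value_checkboxes_selected == "Not Selected" then
          ok && (PySem.List.pyGetD array_checkboxes_selected i false == false)
        else ok
      out ++ [ok])
    []

-- ===== PRECONDITION & SPEC =====
-- Pre_ excludes exactly the inputs on which the Python A raises IndexError: a row too short for a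
-- selected dropdown value, or (checkbox filter active) an index whose row passes the dropdown
-- filters but has no checkbox entry (A's `and` short-circuits, so only those indices are read).
def Pre_arrays_options_filters (array_to_filter : List (List String)) (array_checkboxes_selected : List Bool) (value1 : String) (value2 : String) (value_checkboxes_selected : String) : Prop :=
  (value1 ≠ "(no selection)" → ∀ r ∈ array_to_filter, 1 ≤ r.length) ∧
  (value2 ≠ "(no selection)" → ∀ r ∈ array_to_filter, 2 ≤ r.length) ∧
  ((value_checkboxes_selected = "Selected" ∨ value_checkboxes_selected = "Not Selected") →
    ∀ i < array_to_filter.length,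
      ((value1 = "(no selection)" ∨ (array_to_filter.getD i []).getD 0 "" = value1) ∧
       (value2 = "(no selection)" ∨ (array_to_filter.getD i []).getD 1 "" = value2)) →
      i < array_checkboxes_selected.length)
instance (array_to_filter : List (List String)) (array_checkboxes_selected : List Bool) (value1 : String) (value2 : String) (value_checkboxes_selected : String) : Decidable (Pre_arrays_options_filters array_to_filter array_checkboxes_selected value1 value2 value_checkboxes_selected) := by unfold Pre_arrays_options_filters; infer_instance

def pvWitness_arrays_options_filters : List (List String) × List Bool × String × String × String :=
  ([["a", "b"]], [true], "a", "(no selection)", "Selected")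

def Spec_arrays_options_filters (array_to_filter : List (List String)) (array_checkboxes_selected : List Bool) (value1 : String) (value2 : String) (value_checkboxes_selected : String) (out : List Bool) : Prop := out = arrays_options_filters_alt array_to_filter array_checkboxes_selected value1 value2 value_checkboxes_selected
instance (array_to_filter : List (List String)) (array_checkboxes_selected : List Bool) (value1 : String) (value2 : String) (value_checkboxes_selected : String) (out : List Bool) : Decidable (Spec_arrays_options_filters array_to_filter array_checkboxes_selected value1 value2 value_checkboxes_selected out) := by unfold Spec_arrays_options_filters; infer_instance

-- ===== CLAIM (what is proved, stated in full; the proofs are below) =====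
def Claim_equal_arrays_options_filters : Prop := ∀ (array_to_filter : List (List String)) (array_checkboxes_selected : List Bool) (value1 : String) (value2 : String) (value_checkboxes_selected : String), Dom_arrays_options_filters array_to_filter array_checkboxes_selected value1 value2 value_checkboxes_selected → Pre_arrays_options_filters array_to_filter array_checkboxes_selected value1 value2 value_checkboxes_selected → Spec_arrays_options_filters array_to_filter array_checkboxes_selected value1 value2 value_checkboxes_selected (arrays_options_filters array_to_filter array_checkboxes_selected value1 value2 value_checkboxes_selected)

-- ===== LEMMAS AND PROOFS =====
-- Both ports are shown equal to one common closed form: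
-- (range n).map (fun j => cbStep acb vcb j (baseD atf v1 v2 j)).
def cbStep (acb : List Bool) (vcb : String) (i : Int) (b : Bool) : Bool :=
  if vcb == "Selected" then b && (PySem.List.pyGetD acb i false == true)
  else if vcb == "Not Selected" then b && (PySem.List.pyGetD acb i false == false)
  else b

def baseD (atf : List (List String)) (v1 v2 : String) (i : Int) : Bool :=
  (if v1 == "(no selection)" then true else PySem.List.pyGetD (PySem.List.pyGetD atf i []) 0 "" == v1) &&
  (if v2 == "(no selection)" then true else PySem.List.pyGetD (PySem.List.pyGetD atf i []) 1 "" == v2)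

lemma pair_get0 {α : Type} (x y : α) (d : α) : PySem.List.pyGetD [x,y] 0 d = x := by
  simp [PySem.List.pyGetD, PySem.List.pyGet?, PySem.List.pyIdx?]
lemma pair_get1 {α : Type} (x y : α) (d : α) : PySem.List.pyGetD [x,y] 1 d = y := by
  simp [PySem.List.pyGetD, PySem.List.pyGet?, PySem.List.pyIdx?]
lemma pair_set0 {α : Type} (x y v : α) : PySem.List.pySetD [x,y] 0 v = [v,y] := by
  simp [PySem.List.pySetD, PySem.List.pySet?, PySem.List.pyIdx?]
lemma pair_set1 {α : Type} (x y v : α) : PySem.List.pySetD [x,y] 1 v = [x,v] := by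
  simp [PySem.List.pySetD, PySem.List.pySet?, PySem.List.pyIdx?]

lemma step_key (f : Int → Bool → Bool) (pref suf : List Bool) (a : Bool) (m : Nat) (hp : pref.length = m) :
    PySem.List.pySetD (pref ++ a :: suf) (m : Int)
        (f (m : Int) (PySem.List.pyGetD (pref ++ a :: suf) (m : Int) false))
      = pref ++ f (m : Int) a :: suf := by
  subst hp
  rw [PySem.List.pyGetD_natCast, PySem.List.pySetD_natCast]
  simp [List.set_append_right _ _ (le_refl _)]

lemma setloop (f : Int → Bool → Bool) :
    ∀ (m : Nat) (xs : List Bool), m ≤ xs.length →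
    (PySem.List.pyRange 0 (m : Int) 1).foldl
        (fun o i => PySem.List.pySetD o i (f i (PySem.List.pyGetD o i false))) xs
      = ((List.range m).map (fun (j : Nat) => f (j : Int) (xs.getD j false))) ++ xs.drop m := by
  intro m
  induction m with
  | zero => intro xs h; simp
  | succ m ih =>
    intro xs h
    rw [show ((m+1:Nat):Int) = (m:Int)+1 by push_cast; ring,
        PySem.List.pyRange_one_succ_right (by positivity), List.foldl_append, ih xs (by omega)]
    have hm : m < xs.length := h
    rw [List.drop_eq_getElem_cons hm]
    simp only [List.foldl_cons, List.foldl_nil]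
    rw [step_key f _ _ _ m (by simp)]
    simp [List.range_succ, hm]

lemma lfa_eq (out a2 : List Bool) (c1 c2 : Bool) :
    logic_filter_and out c1 a2 c2
      = (List.range out.length).map
          (fun (j : Nat) => (out.getD j false == c1) && (PySem.List.pyGetD a2 (j : Int) false == c2)) := by
  unfold logic_filter_and
  rw [PySem.List.len_eq]
  have hb : ∀ (o : List Bool) (i : Int),
      (if PySem.List.pyGetD o i false == c1 && PySem.List.pyGetD a2 i false == c2
       then PySem.List.pySetD o i true else PySem.List.pySetD o i false)
      = PySem.List.pySetD o i
          ((fun (i : Int) (b : Bool) => b == c1 && PySem.List.pyGetD a2 i false == c2) i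
            (PySem.List.pyGetD o i false)) := by
    intro o i
    cases hc : (PySem.List.pyGetD o i false == c1 && PySem.List.pyGetD a2 i false == c2) <;> simp [hc]
  simp only [hb]
  exact (setloop (fun (i : Int) (b : Bool) => b == c1 && PySem.List.pyGetD a2 i false == c2)
      out.length out (le_refl _)).trans (by simp)

lemma auxloop (u0 u1 : Bool) (c0 c1 : Int → Bool) :
    ∀ (m : Nat) (a0 a1 : List Bool), m ≤ a0.length → m ≤ a1.length →
    (PySem.List.pyRange 0 (m : Int) 1).foldl
      (fun A i =>
        let A1 := if u0 then PySem.List.pySetD A 0 (PySem.List.pySetD (PySem.List.pyGetD A 0 []) i (c0 i)) else A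
        if u1 then PySem.List.pySetD A1 1 (PySem.List.pySetD (PySem.List.pyGetD A1 1 []) i (c1 i)) else A1)
      [a0, a1]
    = [ if u0 then ((List.range m).map (fun (j : Nat) => c0 (j : Int))) ++ a0.drop m else a0,
        if u1 then ((List.range m).map (fun (j : Nat) => c1 (j : Int))) ++ a1.drop m else a1 ] := by
  intro m
  induction m with
  | zero => intro a0 a1 h0 h1; simp
  | succ m ih =>
    intro a0 a1 h0 h1
    rw [show ((m+1:Nat):Int) = (m:Int)+1 by push_cast; ring,
        PySem.List.pyRange_one_succ_right (by positivity), List.foldl_append, ih a0 a1 (by omega) (by omega)]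
    simp only [List.foldl_cons, List.foldl_nil]
    have hm0 : m < a0.length := h0
    have hm1 : m < a1.length := h1
    have hset : ∀ (xs pref : List Bool) (v : Bool), pref.length = m → m < xs.length →
        PySem.List.pySetD (pref ++ xs.drop m) (m : Int) v = (pref ++ [v]) ++ xs.drop (m+1) := by
      intro xs pref v hp hmx
      subst hp
      conv_lhs => rw [List.drop_eq_getElem_cons hmx]
      rw [PySem.List.pySetD_natCast, List.set_append_right _ _ (le_refl _)]
      simp only [Nat.sub_self, List.set_cons_zero, List.append_assoc, List.singleton_append]
    cases u0 <;> cases u1 <;>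
      simp [pair_get1, pair_set0, pair_set1, hset, hm0, hm1, List.range_succ]

lemma create_array_eq (n : Nat) : create_array (n : Int) = List.replicate n false := by
  unfold create_array
  rw [PySem.List.foldl_append_singleton_eq_map (f := fun _ => false)]
  simp [List.map_const', PySem.List.length_pyRange_one]

lemma map_getD_self {α : Type} (l : List α) (d : α) :
    (List.range l.length).map (fun j => l[j]?.getD d) = l := by
  apply List.ext_getElem (by simp)
  intro i h1 h2
  simp [List.getElem?_eq_getElem h2]

lemma cb_tail (acb : List Bool) (vcb : String) (fo : List Bool) :
    (if vcb = "(no selection)" then fo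
     else if vcb = "Selected" then logic_filter_and fo true acb true
     else if vcb = "Not Selected" then logic_filter_and fo true acb false
     else fo)
    = (List.range fo.length).map (fun (j : Nat) => cbStep acb vcb ↑j (fo[j]?.getD false)) := by
  by_cases e1 : vcb = "Selected"
  · subst e1; simp [lfa_eq, cbStep]
  · by_cases e2 : vcb = "Not Selected"
    · subst e2; simp [lfa_eq, cbStep]
    · by_cases e3 : vcb = "(no selection)"
      · subst e3
        simp [cbStep]
        exact (map_getD_self fo false).symm
      · simp [cbStep, e1, e2, e3]
        exact (map_getD_self fo false).symm

lemma ite_pySetD2 (a b : String) (A : List (List Bool)) (k i : Int) (x : List Bool) :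
    (if a = b then PySem.List.pySetD A k (PySem.List.pySetD x i true)
     else PySem.List.pySetD A k (PySem.List.pySetD x i false))
      = PySem.List.pySetD A k (PySem.List.pySetD x i (a == b)) := by
  by_cases h : a = b
  · simp [h]
  · rw [if_neg h, show (a == b) = false from by simp [h]]

set_option maxHeartbeats 1000000 in
lemma A_eq (atf : List (List String)) (acb : List Bool) (v1 v2 vcb : String) :
    arrays_options_filters atf acb v1 v2 vcb
      = (List.range atf.length).map
          (fun (j : Nat) => cbStep acb vcb (j : Int) (baseD atf v1 v2 (j : Int))) := by
  have hr2 : PySem.List.pyRange 0 2 1 = [0, 1] := by decide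
  by_cases h1 : v1 = "(no selection)" <;> by_cases h2 : v2 = "(no selection)"
  · -- none selected: all TRUE
    have hall := setloop (fun _ _ => true) atf.length (List.replicate atf.length false) (by simp)
    simp only [List.drop_replicate, Nat.sub_self, List.replicate_zero, List.append_nil,
               List.map_const', List.length_range] at hall
    unfold arrays_options_filters
    simp [cb_tail, hr2, h1, h2, create_array_eq, PySem.List.len_eq, hall, cbStep, baseD,
          pair_get1]
    intro j hjn
    split_ifs <;> simp_all [List.getElem?_replicate]
  · -- only value2 selected
    have e2 : (v2 == "(no selection)") = false := by simp [h2]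
    have haux := auxloop false true (fun _ => true)
        (fun i => PySem.List.pyGetD (PySem.List.pyGetD atf i []) 1 "" == v2)
        atf.length (List.replicate atf.length false) (List.replicate atf.length false)
        (by simp) (by simp)
    simp only [if_true, Bool.false_eq_true, if_false, List.drop_replicate, Nat.sub_self,
               List.replicate_zero, List.append_nil] at haux
    unfold arrays_options_filters
    simp [cb_tail, hr2, h1, h2, e2, pair_get1, create_array_eq,
          PySem.List.len_eq, ite_pySetD2, haux, cbStep, baseD]
    intro j hjn
    split_ifs <;> simp_all [List.getElem?_map, List.getElem?_range, List.getElem?_replicate]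
  · -- only value1 selected
    have e1 : (v1 == "(no selection)") = false := by simp [h1]
    have haux := auxloop true false
        (fun i => PySem.List.pyGetD (PySem.List.pyGetD atf i []) 0 "" == v1)
        (fun _ => true)
        atf.length (List.replicate atf.length false) (List.replicate atf.length false)
        (by simp) (by simp)
    simp only [if_true, Bool.false_eq_true, if_false, List.drop_replicate, Nat.sub_self,
               List.replicate_zero, List.append_nil] at haux
    unfold arrays_options_filters
    simp [cb_tail, hr2, h1, h2, e1, pair_get1, create_array_eq,
          PySem.List.len_eq, ite_pySetD2, haux, cbStep, baseD]
    intro j hjn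
    split_ifs <;> simp_all [List.getElem?_map, List.getElem?_range, List.getElem?_replicate]
  · -- both selected
    have e1 : (v1 == "(no selection)") = false := by simp [h1]
    have e2 : (v2 == "(no selection)") = false := by simp [h2]
    have haux := auxloop true true
        (fun i => PySem.List.pyGetD (PySem.List.pyGetD atf i []) 0 "" == v1)
        (fun i => PySem.List.pyGetD (PySem.List.pyGetD atf i []) 1 "" == v2)
        atf.length (List.replicate atf.length false) (List.replicate atf.length false)
        (by simp) (by simp)
    simp only [if_true, List.drop_replicate, Nat.sub_self, List.replicate_zero, List.append_nil] at haux
    unfold arrays_options_filters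
    simp [cb_tail, hr2, h1, h2, e1, e2, pair_get1, create_array_eq, PySem.List.len_eq,
          ite_pySetD2, haux, cbStep, baseD]
    rw [lfa_eq]
    simp only [List.length_map, List.length_range]
    apply List.map_congr_left
    intro j hj
    have hjn : j < atf.length := List.mem_range.mp hj
    split_ifs <;>
      simp [List.getElem?_map, List.getElem?_range, hjn, PySem.List.pyGetD_natCast, Bool.and_assoc]

lemma flatten_map_singleton {α β : Type} (f : α → β) (l : List α) :
    (l.map (fun x => [f x])).flatten = l.map f := by
  induction l with
  | nil => rfl
  | cons x xs ih => simp only [List.map_cons, List.flatten_cons, ih, List.singleton_append]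

set_option maxHeartbeats 1000000 in
lemma B_eq (atf : List (List String)) (acb : List Bool) (v1 v2 vcb : String) :
    arrays_options_filters_alt atf acb v1 v2 vcb
      = (List.range atf.length).map
          (fun (j : Nat) => cbStep acb vcb (j : Int) (baseD atf v1 v2 (j : Int))) := by
  have hr2 : PySem.List.pyRange 0 2 1 = [0, 1] := by decide
  unfold arrays_options_filters_alt
  by_cases h1 : v1 = "(no selection)" <;> by_cases h2 : v2 = "(no selection)" <;>
    simp [PySem.List.foldl_append_singleton_eq_map, PySem.List.pyRange_zero_natCast,
          List.map_map, hr2, h1, h2, pair_get0, pair_get1, PySem.List.len_eq, cbStep, baseD,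
          Function.comp_def] <;>
    simp [flatten_map_singleton]

-- ===== VERDICT (by name: the statement is the Claim_ definition above) =====
theorem arrays_options_filters_spec : Claim_equal_arrays_options_filters := by
  intro array_to_filter array_checkboxes_selected value1 value2 value_checkboxes_selected _hdom _hpre
  unfold Spec_arrays_options_filters
  rw [A_eq, B_eq]
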